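-- pv_equiv track=rewrite | github.com/vilebile17/AdventOfCode | day6.py | normal_math
-- ===== SOURCE A (Python) =====
-- def add(a, b):
--     return a + b
--
-- def mul(a, b):
--     return a * b
--
-- def normal_math(operations, nums):
--     counter = 0
--     operation_list = operations[0]
--     for i in range(len(operation_list)):
--         if operation_list[i] == "+":
--             func = add
--         else:
--             func = mul
--
--         result = nums[0][i]
--         for j in range(1, len(nums)):
--             result = func(result, nums[j][i])
--         counter += result
--
--     return counter
-- ===== SOURCE B (Python) =====
-- def normal_math(operations, nums):
--     ops = operations[0]
--     accum = [0 if op == "+" else 1 for op in ops]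
--     for row in nums:
--         accum = [a + row[i] if ops[i] == "+" else a * row[i] for i, a in enumerate(accum)]
--     return sum(accum)
-- ===== Notes on version B (the rewrite author's own statement) =====
-- stated objective: alternative
-- what changed: Replaces the column-major nested reduction (one full pass over all rows per column) with a single row-major pass threading a per-column accumulator list initialized to the op's identity (0 for '+', 1 otherwise), summed at the end.
-- crash fix: On a nonempty operations[0] with an empty nums list A raises IndexError (nums[0]); B returns the sum of the per-column identities (count of non-'+' ops). — e.g. on normal_math([["*", "+"]], []): A raises IndexError, B returns 1
import Mathlib
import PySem

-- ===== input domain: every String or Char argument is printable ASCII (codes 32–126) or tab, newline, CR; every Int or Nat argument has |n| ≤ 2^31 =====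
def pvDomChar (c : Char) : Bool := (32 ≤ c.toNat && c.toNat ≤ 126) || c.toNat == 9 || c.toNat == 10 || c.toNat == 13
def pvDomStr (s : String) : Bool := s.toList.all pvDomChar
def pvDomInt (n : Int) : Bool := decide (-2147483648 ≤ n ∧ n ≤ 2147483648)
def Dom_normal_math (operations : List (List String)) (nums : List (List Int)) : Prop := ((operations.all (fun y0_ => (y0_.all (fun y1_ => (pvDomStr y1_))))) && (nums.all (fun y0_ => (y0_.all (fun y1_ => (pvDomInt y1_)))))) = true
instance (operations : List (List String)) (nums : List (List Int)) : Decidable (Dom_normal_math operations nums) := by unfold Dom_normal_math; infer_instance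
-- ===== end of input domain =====

-- B changes the decomposition: a single row-major pass over nums threading a per-column
-- accumulator list (identity-initialized), instead of A's per-column nested reduction.
-- ===== PORT A =====
def pvAdd (a b : Int) : Int := a + b
def pvMul (a b : Int) : Int := a * b

def normal_math (operations : List (List String)) (nums : List (List Int)) : Int :=
  let operation_list := PySem.List.pyGetD operations 0 []
  (List.range operation_list.length).foldl (fun counter (i : Nat) =>
    let func := if PySem.List.pyGetD operation_list (i : Int) "" == "+" then pvAdd else pvMul
    let result := PySem.List.pyGetD (PySem.List.pyGetD nums 0 []) (i : Int) 0
    let result := (PySem.List.pyRange 1 (nums.length : Int) 1).foldl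
      (fun result j => func result (PySem.List.pyGetD (PySem.List.pyGetD nums j []) (i : Int) 0)) result
    counter + result) 0

-- ===== PORT B =====
def normal_math_alt (operations : List (List String)) (nums : List (List Int)) : Int :=
  let ops := PySem.List.pyGetD operations 0 []
  let accum0 := ops.map (fun op => if op == "+" then (0 : Int) else 1)
  let accum := nums.foldl (fun accum row =>
    (PySem.List.enumerate accum).map (fun p =>
      if PySem.List.pyGetD ops p.1 "" == "+" then p.2 + PySem.List.pyGetD row p.1 0
      else p.2 * PySem.List.pyGetD row p.1 0)) accum0
  accum.sum

-- ===== PRECONDITION & SPEC =====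
-- Pre_ excludes exactly the inputs where Python A raises IndexError: empty operations,
-- and (when operations[0] is nonempty) empty nums or a row shorter than operations[0].
def Pre_normal_math (operations : List (List String)) (nums : List (List Int)) : Prop :=
  operations ≠ [] ∧ (operations.headD [] ≠ [] →
    nums ≠ [] ∧ ∀ row ∈ nums, (operations.headD []).length ≤ row.length)
instance (operations : List (List String)) (nums : List (List Int)) : Decidable (Pre_normal_math operations nums) := by unfold Pre_normal_math; infer_instance

def pvWitness_normal_math : List (List String) × List (List Int) :=
  ([["+", "*"]], [[1, 2], [3, 4]])

-- On a nonempty operations[0] with an empty nums list A raises IndexError (nums[0]);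
-- B returns the sum of the per-column identities (count of non-'+' ops).
def Raises_normal_math (operations : List (List String)) (nums : List (List Int)) : Prop :=
  operations ≠ [] ∧ operations.headD [] ≠ [] ∧ nums = []
instance (operations : List (List String)) (nums : List (List Int)) : Decidable (Raises_normal_math operations nums) := by unfold Raises_normal_math; infer_instance
def pvRaiseWitness_normal_math : List (List String) × List (List Int) := ([["*", "+"]], [])
def pvRaiseWitnessOut_normal_math : Int := 1

def Spec_normal_math (operations : List (List String)) (nums : List (List Int)) (out : Int) : Prop := out = normal_math_alt operations nums
instance (operations : List (List String)) (nums : List (List Int)) (out : Int) : Decidable (Spec_normal_math operations nums out) := by unfold Spec_normal_math; infer_instance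

-- ===== CLAIM (what is proved, stated in full; the proofs are below) =====
def Claim_equal_normal_math : Prop := ∀ (operations : List (List String)) (nums : List (List Int)), Dom_normal_math operations nums → Pre_normal_math operations nums → Spec_normal_math operations nums (normal_math operations nums)
def Claim_raises_normal_math : Prop := (∀ (operations : List (List String)) (nums : List (List Int)), Dom_normal_math operations nums → Raises_normal_math operations nums → ¬ Pre_normal_math operations nums) ∧ (Dom_normal_math (pvRaiseWitness_normal_math.1) (pvRaiseWitness_normal_math.2) ∧ Raises_normal_math (pvRaiseWitness_normal_math.1) (pvRaiseWitness_normal_math.2) ∧ normal_math_alt (pvRaiseWitness_normal_math.1) (pvRaiseWitness_normal_math.2) = pvRaiseWitnessOut_normal_math)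

-- ===== LEMMAS AND PROOFS =====

-- abbreviations used only by the proofs
def colStep (ops : List String) (i : Nat) (a : Int) (row : List Int) : Int :=
  if PySem.List.pyGetD ops (i : Int) "" == "+" then a + PySem.List.pyGetD row (i : Int) 0
  else a * PySem.List.pyGetD row (i : Int) 0

def rowStep (ops : List String) (accum row : List Int) : List Int :=
  (PySem.List.enumerate accum).map (fun p =>
    if PySem.List.pyGetD ops p.1 "" == "+" then p.2 + PySem.List.pyGetD row p.1 0
    else p.2 * PySem.List.pyGetD row p.1 0)

-- A's dispatch through a function variable, as an ite of values
theorem pvFunc_ite (c : Bool) (a v : Int) :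
    (if c then pvAdd else pvMul) a v = if c then a + v else a * v := by
  cases c <;> rfl

-- one step from the op's identity element yields the row's entry
theorem colStep_ident (c : Bool) (v : Int) :
    (if c then (if c then (0 : Int) else 1) + v else (if c then (0 : Int) else 1) * v) = v := by
  cases c <;> simp

-- a counter loop is a sum
theorem foldl_counter (l : List Nat) (F : Nat → Int) :
    ∀ init : Int, l.foldl (fun c i => c + F i) init = init + (l.map F).sum := by
  induction l with
  | nil => intro init; simp
  | cons x xs ih => intro init; simp only [List.foldl_cons, List.map_cons, List.sum_cons, ih]; ring

-- one row-major step on a range-indexed accumulator acts column-wise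
theorem rowStep_map_range (ops : List String) (g : Nat → Int) (row : List Int) :
    rowStep ops ((List.range ops.length).map g) row
      = (List.range ops.length).map (fun i => colStep ops i (g i) row) := by
  apply List.ext_getElem
  · simp [rowStep, PySem.List.length_enumerate]
  · intro k h1 h2
    have hk : k < ops.length := by simpa using h2
    simp only [rowStep, List.getElem_map, PySem.List.getElem_enumerate, List.getElem_range]
    simp [colStep, hk]

-- the whole row-major fold computes every column's reduction
theorem fold_rowStep (ops : List String) (rows : List (List Int)) :
    ∀ g : Nat → Int,
      rows.foldl (rowStep ops) ((List.range ops.length).map g)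
        = (List.range ops.length).map (fun i => rows.foldl (colStep ops i) (g i)) := by
  induction rows with
  | nil => intro g; simp
  | cons r rest ih =>
    intro g
    simp only [List.foldl_cons]
    rw [rowStep_map_range, ih]

theorem accum0_eq (ops : List String) :
    ops.map (fun op => if op == "+" then (0 : Int) else 1)
      = (List.range ops.length).map
          (fun (i : Nat) => if PySem.List.pyGetD ops (i : Int) "" == "+" then (0 : Int) else 1) := by
  apply List.ext_getElem
  · simp
  · intro k h1 h2
    have hk : k < ops.length := by simpa using h1
    simp only [List.getElem_map, List.getElem_range]
    simp [hk]

theorem normal_math_alt_eq (operations : List (List String)) (nums : List (List Int)) :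
    normal_math_alt operations nums
      = ((List.range (PySem.List.pyGetD operations 0 []).length).map
          (fun i => nums.foldl (colStep (PySem.List.pyGetD operations 0 []) i)
            (if PySem.List.pyGetD (PySem.List.pyGetD operations 0 []) (i : Int) "" == "+" then (0 : Int) else 1))).sum := by
  unfold normal_math_alt
  have h2 : ∀ (accum row : List Int),
      (PySem.List.enumerate accum).map (fun p =>
        if PySem.List.pyGetD (PySem.List.pyGetD operations 0 []) p.1 "" == "+"
        then p.2 + PySem.List.pyGetD row p.1 0
        else p.2 * PySem.List.pyGetD row p.1 0) = rowStep (PySem.List.pyGetD operations 0 []) accum row := by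
    intro accum row; rfl
  simp only [h2, accum0_eq, fold_rowStep]

theorem normal_math_eq (operations : List (List String)) (nums : List (List Int)) :
    normal_math operations nums
      = ((List.range (PySem.List.pyGetD operations 0 []).length).map
          (fun (i : Nat) =>
            (PySem.List.pyRange 1 (nums.length : Int) 1).foldl
              (fun result j =>
                (if PySem.List.pyGetD (PySem.List.pyGetD operations 0 []) (i : Int) "" == "+" then pvAdd else pvMul)
                  result (PySem.List.pyGetD (PySem.List.pyGetD nums j []) (i : Int) 0))
              (PySem.List.pyGetD (PySem.List.pyGetD nums 0 []) (i : Int) 0))).sum := by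
  unfold normal_math
  rw [foldl_counter]
  simp

-- ===== VERDICT (by name: the statement is the Claim_ definition above) =====
theorem normal_math_spec : Claim_equal_normal_math := by
  intro operations nums _ hpre
  unfold Spec_normal_math
  rw [normal_math_eq, normal_math_alt_eq]
  set ops := PySem.List.pyGetD operations 0 [] with hops
  by_cases hopsnil : ops = []
  · simp [hopsnil]
  · -- operations is nonempty (Pre), and ops = operations.headD []
    have hhead : operations.headD [] = ops := by
      rcases operations with _ | ⟨o, os⟩
      · exact absurd rfl hpre.1
      · simp [hops, PySem.List.pyGetD]
    have hnums : nums ≠ [] := ((hpre.2 (hhead ▸ hopsnil)).1)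
    rcases nums with _ | ⟨r, rest⟩
    · exact absurd rfl hnums
    congr 1
    apply List.map_congr_left
    intro i hi
    -- left side: fold over indices 1..len; rewrite as a fold over rest
    rw [PySem.List.foldl_pyRange_pyGetD' (r :: rest) ([] : List Int)
        (fun result row =>
          (if PySem.List.pyGetD ops (i : Int) "" == "+" then pvAdd else pvMul)
            result (PySem.List.pyGetD row (i : Int) 0))
        (PySem.List.pyGetD (PySem.List.pyGetD (r :: rest) 0 []) (i : Int) 0) (a := 1) (by omega)]
    have hdrop : (r :: rest).drop (1 : Int).toNat = rest := by simp
    rw [hdrop]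
    have hinit : PySem.List.pyGetD (PySem.List.pyGetD (r :: rest) 0 []) (i : Int) 0
        = PySem.List.pyGetD r (i : Int) 0 := by
      simp [PySem.List.pyGetD_zero_cons]
    rw [hinit]
    -- right side: peel off the first row, whose step from the identity yields r[i]
    have hfirst : colStep ops i (if PySem.List.pyGetD ops (i : Int) "" == "+" then (0 : Int) else 1) r
        = PySem.List.pyGetD r (i : Int) 0 :=
      colStep_ident (PySem.List.pyGetD ops (i : Int) "" == "+") (PySem.List.pyGetD r (i : Int) 0)
    simp only [List.foldl_cons, hfirst]
    simp only [pvFunc_ite]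
    rfl

def normal_math_raises : Claim_raises_normal_math := by
  unfold Claim_raises_normal_math
  constructor
  · intro operations nums _ hr hp
    rcases hr with ⟨_, hhead, hnil⟩
    exact (hp.2 hhead).1 hnil
  · exact ⟨by decide, by decide, by decide⟩
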